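-- pv_equiv track=rewrite | github.com/mkaynarca/starfieldLockpicker | main.py | filterCombinations
-- ===== SOURCE A (Python) =====
-- from itertools import chain, combinations, product
--
-- def filterCombinations(locks:list, combinations:list):
--     validCombinations = []
--     for lock in locks:
--         lockSet = set(lock)
--         validCombinations.append([])
--         for l, cLock in enumerate(combinations):
--             for c, combination in enumerate(cLock):
--                 tickComb = []
--                 for pick in combination:
--                     for tick in pick[0][1]:
--                         tickComb.append(tick)
--                 if len(set(tickComb)) != len(tickComb):
--                     continue
--                 elif set(tickComb) != set(lock):
--                     continue
--                 else:
--                     validCombinations[-1].append(combination)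
--     return validCombinations
-- ===== SOURCE B (Python) =====
-- def filterCombinations(locks: list, combinations: list):
--     # Bucket every duplicate-free combination once by its sorted tick-set key,
--     # then answer each lock with a single dict lookup.
--     if not locks:
--         return []  # nothing to answer: skip building the buckets entirely
--     buckets = {}
--     for cLock in combinations:
--         for combination in cLock:
--             ticks = [tick for pick in combination for tick in pick[0][1]]
--             tickSet = set(ticks)
--             if len(tickSet) == len(ticks):
--                 key = tuple(sorted(tickSet))
--                 buckets.setdefault(key, []).append(combination)
--     return [buckets.get(tuple(sorted(set(lock))), []) for lock in locks]
-- ===== Notes on version B (the rewrite author's own statement) =====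
-- stated objective: faster
-- what changed: Instead of re-scanning and re-checking every combination for every lock, B computes each combination's tick list once, buckets duplicate-free combinations in a dict keyed by the sorted tick-set, and answers each lock with one dict lookup on its sorted tick-set (with an early return for zero locks).
import Mathlib
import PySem

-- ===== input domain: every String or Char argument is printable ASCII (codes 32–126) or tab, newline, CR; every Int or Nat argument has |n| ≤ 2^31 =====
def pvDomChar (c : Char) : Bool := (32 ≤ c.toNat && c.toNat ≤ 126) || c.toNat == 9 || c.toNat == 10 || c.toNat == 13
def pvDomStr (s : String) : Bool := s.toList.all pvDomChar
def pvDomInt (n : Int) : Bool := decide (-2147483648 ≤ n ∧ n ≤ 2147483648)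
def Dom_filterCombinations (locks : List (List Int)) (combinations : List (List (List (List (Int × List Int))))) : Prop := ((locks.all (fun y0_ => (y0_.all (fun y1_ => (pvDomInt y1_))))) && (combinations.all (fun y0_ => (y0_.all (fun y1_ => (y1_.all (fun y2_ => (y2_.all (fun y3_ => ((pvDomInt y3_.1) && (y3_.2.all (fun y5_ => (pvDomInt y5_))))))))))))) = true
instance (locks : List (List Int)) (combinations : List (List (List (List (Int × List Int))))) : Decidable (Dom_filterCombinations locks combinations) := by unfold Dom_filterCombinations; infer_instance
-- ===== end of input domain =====

-- B buckets duplicate-free combinations once by sorted tick-set and answers each lock by one dict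
-- lookup (returning at once when there are no locks), replacing A's per-lock rescan of all
-- combinations (measured faster; return value only).

-- ===== PORT A =====
def filterCombinations (locks : List (List Int)) (combinations : List (List (List (List (Int × List Int))))) : List (List (List (List (Int × List Int)))) :=
  locks.foldl (fun validCombinations lock =>
    let _lockSet := PySem.Set.ofList lock
    validCombinations ++ [
      combinations.foldl (fun row cLock =>
        cLock.foldl (fun row combination =>
          let tickComb : List Int := combination.foldl (fun tc pick =>
            (((PySem.List.pyGet? pick 0).getD (0, [])).2).foldl (fun tc tick => tc ++ [tick]) tc) []
          if (PySem.Set.ofList tickComb).length ≠ tickComb.length then row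
          else if !(PySem.Set.equal (PySem.Set.ofList tickComb) (PySem.Set.ofList lock)) then row
          else row ++ [combination]) row) []]) []

-- ===== PORT B =====
def filterCombinations_alt (locks : List (List Int)) (combinations : List (List (List (List (Int × List Int))))) : List (List (List (List (Int × List Int)))) :=
  if locks.isEmpty then []
  else
    let buckets : PySem.Dict (List Int) (List (List (List (Int × List Int)))) :=
      combinations.foldl (fun d cLock =>
        cLock.foldl (fun d combination =>
          let ticks : List Int := combination.flatMap (fun pick => ((PySem.List.pyGet? pick 0).getD (0, [])).2)
          let tickSet := PySem.Set.ofList ticks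
          if tickSet.length = ticks.length then
            d.modify (PySem.List.sorted tickSet (fun x => x) false) [] (fun l => l ++ [combination])
          else d) d) PySem.Dict.empty
    locks.map (fun lock => buckets.getD (PySem.List.sorted (PySem.Set.ofList lock) (fun x => x) false) [])

-- ===== PRECONDITION & SPEC =====
-- Pre_ excludes only inputs on which the Python A raises: some lock exists (so the inner loop runs)
-- and some pick is empty, making pick[0] an IndexError; with locks = [] A returns [] and stays inside.
def Pre_filterCombinations (locks : List (List Int)) (combinations : List (List (List (List (Int × List Int))))) : Prop :=
  (locks.isEmpty || combinations.all (fun cLock => cLock.all (fun combination => combination.all (fun pick => !pick.isEmpty)))) = true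
instance (locks : List (List Int)) (combinations : List (List (List (List (Int × List Int))))) : Decidable (Pre_filterCombinations locks combinations) := by unfold Pre_filterCombinations; infer_instance
def pvWitness_filterCombinations : List (List Int) × (List (List (List (List (Int × List Int))))) :=
  ([[1]], [[[[(0, [1])]]]])

def Spec_filterCombinations (locks : List (List Int)) (combinations : List (List (List (List (Int × List Int))))) (out : List (List (List (List (Int × List Int))))) : Prop := out = filterCombinations_alt locks combinations
instance (locks : List (List Int)) (combinations : List (List (List (List (Int × List Int))))) (out : List (List (List (List (Int × List Int))))) : Decidable (Spec_filterCombinations locks combinations out) := by unfold Spec_filterCombinations; infer_instance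

-- ===== CLAIM (what is proved, stated in full; the proofs are below) =====
def Claim_equal_filterCombinations : Prop := ∀ (locks : List (List Int)) (combinations : List (List (List (List (Int × List Int))))), Dom_filterCombinations locks combinations → Pre_filterCombinations locks combinations → Spec_filterCombinations locks combinations (filterCombinations locks combinations)

-- ===== LEMMAS AND PROOFS =====

-- the flattened tick list of one combination (shared vocabulary of the proofs)
def pvTicks (c : List (List (Int × List Int))) : List Int :=
  c.flatMap (fun pick => ((PySem.List.pyGet? pick 0).getD (0, [])).2)

def pvKey (c : List (List (Int × List Int))) : List Int :=
  PySem.List.sorted (PySem.Set.ofList (pvTicks c)) (fun x => x) false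

def pvOk (c : List (List (Int × List Int))) : Bool :=
  (PySem.Set.ofList (pvTicks c)).length == (pvTicks c).length

lemma pv_foldl_append (l acc : List Int) :
    l.foldl (fun a t => a ++ [t]) acc = acc ++ l := by
  induction l generalizing acc with
  | nil => simp
  | cons x xs ih => simp [List.foldl_cons, ih, List.append_assoc]

lemma pv_ticks_eq (c : List (List (Int × List Int))) :
    (c.foldl (fun tc pick =>
      (((PySem.List.pyGet? pick 0).getD (0, [])).2).foldl (fun tc tick => tc ++ [tick]) tc) []) = pvTicks c := by
  suffices h : ∀ acc, (c.foldl (fun tc pick =>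
      (((PySem.List.pyGet? pick 0).getD (0, [])).2).foldl (fun tc tick => tc ++ [tick]) tc) acc) = acc ++ pvTicks c by
    simpa using h []
  induction c with
  | nil => intro acc; simp [pvTicks]
  | cons p ps ih =>
    intro acc
    rw [List.foldl_cons, pv_foldl_append, ih]
    simp [pvTicks, List.append_assoc]

-- the two membership tests agree: set equality = equality of sorted deduplicated lists
lemma pv_equal_eq_sorted_eq (a b : List Int) :
    PySem.Set.equal (PySem.Set.ofList a) (PySem.Set.ofList b)
      = (PySem.List.sorted (PySem.Set.ofList a) (fun x => x) false
          == PySem.List.sorted (PySem.Set.ofList b) (fun x => x) false) := by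
  rw [Bool.eq_iff_iff]
  rw [PySem.Set.equal_iff]
  rw [beq_iff_eq, PySem.List.sorted_id_eq_sorted_id_iff_perm]
  rw [List.perm_ext_iff_of_nodup (PySem.Set.nodup_ofList (xs := a)) (PySem.Set.nodup_ofList (xs := b))]

-- A's inner double loop, for one fixed lock, is a filter of the flattened combination list
lemma pv_rowA_eq (lock : List Int) (combinations : List (List (List (List (Int × List Int))))) :
    (combinations.foldl (fun row cLock =>
        cLock.foldl (fun row combination =>
          let tickComb : List Int := combination.foldl (fun tc pick =>
            (((PySem.List.pyGet? pick 0).getD (0, [])).2).foldl (fun tc tick => tc ++ [tick]) tc) []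
          if (PySem.Set.ofList tickComb).length ≠ tickComb.length then row
          else if !(PySem.Set.equal (PySem.Set.ofList tickComb) (PySem.Set.ofList lock)) then row
          else row ++ [combination]) row) [])
    = combinations.flatten.filter
        (fun c => pvOk c && (pvKey c == PySem.List.sorted (PySem.Set.ofList lock) (fun x => x) false)) := by
  rw [← List.foldl_flatten]
  generalize combinations.flatten = cs
  suffices h : ∀ acc, (cs.foldl (fun row combination =>
          let tickComb : List Int := combination.foldl (fun tc pick =>
            (((PySem.List.pyGet? pick 0).getD (0, [])).2).foldl (fun tc tick => tc ++ [tick]) tc) []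
          if (PySem.Set.ofList tickComb).length ≠ tickComb.length then row
          else if !(PySem.Set.equal (PySem.Set.ofList tickComb) (PySem.Set.ofList lock)) then row
          else row ++ [combination]) acc)
      = acc ++ cs.filter (fun c => pvOk c && (pvKey c == PySem.List.sorted (PySem.Set.ofList lock) (fun x => x) false)) by
    simpa using h []
  induction cs with
  | nil => intro acc; simp
  | cons c cs ih =>
    intro acc
    simp only [List.foldl_cons, List.filter_cons]
    rw [ih, pv_ticks_eq]
    by_cases h1 : (PySem.Set.ofList (pvTicks c)).length ≠ (pvTicks c).length
    · simp only [if_pos h1]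
      have hok : pvOk c = false := by
        unfold pvOk; exact beq_eq_false_iff_ne.mpr h1
      simp [hok]
    · simp only [if_neg h1]
      have hok : pvOk c = true := by
        unfold pvOk; exact beq_iff_eq.mpr (not_ne_iff.mp h1)
      by_cases h2 : !(PySem.Set.equal (PySem.Set.ofList (pvTicks c)) (PySem.Set.ofList lock))
      · simp only [if_pos h2]
        have he : PySem.Set.equal (PySem.Set.ofList (pvTicks c)) (PySem.Set.ofList lock) = false := by
          simpa using h2
        rw [pv_equal_eq_sorted_eq] at he
        simp [hok, pvKey, he]
      · simp only [if_neg h2]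
        have he : PySem.Set.equal (PySem.Set.ofList (pvTicks c)) (PySem.Set.ofList lock) = true := by
          simpa using h2
        rw [pv_equal_eq_sorted_eq] at he
        simp [hok, pvKey, he, List.append_assoc]

-- B's bucket dict: looking up any key yields the filter of the flattened combination list
lemma pv_build_getD (cs : List (List (List (Int × List Int))))
    (d : PySem.Dict (List Int) (List (List (List (Int × List Int))))) (k : List Int) :
    (cs.foldl (fun d combination =>
        let ticks : List Int := combination.flatMap (fun pick => ((PySem.List.pyGet? pick 0).getD (0, [])).2)
        let tickSet := PySem.Set.ofList ticks
        if tickSet.length = ticks.length then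
          d.modify (PySem.List.sorted tickSet (fun x => x) false) [] (fun l => l ++ [combination])
        else d) d).getD k []
    = d.getD k [] ++ cs.filter (fun c => pvOk c && (pvKey c == k)) := by
  induction cs generalizing d with
  | nil => simp
  | cons c cs ih =>
    simp only [List.foldl_cons, List.filter_cons]
    have hT : c.flatMap (fun pick => ((PySem.List.pyGet? pick 0).getD (0, [])).2) = pvTicks c := rfl
    have hK : PySem.List.sorted (PySem.Set.ofList (pvTicks c)) (fun x => x) false = pvKey c := rfl
    simp only [hT, hK]
    by_cases h1 : (PySem.Set.ofList (pvTicks c)).length = (pvTicks c).length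
    · simp only [if_pos h1]
      rw [ih, PySem.Dict.getD_modify]
      have hok : pvOk c = true := by simpa [pvOk, beq_iff_eq] using h1
      by_cases hk : pvKey c = k
      · subst hk
        simp [hok, List.append_assoc]
      · have hb : ((pvKey c : List Int) == k) = false := by simpa using hk
        have hk' : ¬ (k = pvKey c) := fun h => hk h.symm
        simp [hok, hb, hk']
    · simp only [if_neg h1]
      have hok : pvOk c = false := by simpa [pvOk, beq_iff_eq] using h1
      rw [ih]; simp [hok]

lemma pv_map_row (locks : List (List Int)) (row : List Int → List (List (List (Int × List Int)))) :
    (locks.foldl (fun v lock => v ++ [row lock]) []) = locks.map row := by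
  suffices h : ∀ acc, (locks.foldl (fun v lock => v ++ [row lock]) acc) = acc ++ locks.map row by
    simpa using h []
  induction locks with
  | nil => intro acc; simp
  | cons x xs ih => intro acc; simp [List.foldl_cons, ih, List.append_assoc]

-- ===== VERDICT (by name: the statement is the Claim_ definition above) =====
theorem filterCombinations_spec : Claim_equal_filterCombinations := by
  intro locks combinations _ _
  unfold Spec_filterCombinations filterCombinations filterCombinations_alt
  cases locks with
  | nil => simp
  | cons l0 ls =>
    rw [if_neg (by simp)]
    rw [pv_map_row]
    apply List.map_congr_left
    intro lock _
    rw [pv_rowA_eq, ← List.foldl_flatten, pv_build_getD]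
    simp
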